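-- pv_equiv track=rewrite | github.com/Luke-Wei/CBO_Botorch | run_experiments.py | assign_gpu_resources
-- ===== SOURCE A (Python) =====
-- def assign_gpu_resources(experiments, gpu_info, max_parallel_per_gpu=4):
--     """Assign GPU resources for experiments"""
--     if gpu_info["num_gpus"] == 0:
--         # No GPU available, use CPU
--         return [(exp[0], exp[1], exp[2], exp[3], None) for exp in experiments]
--
--     experiment_configs = []
--     gpu_queue = []
--
--     # Create multiple slots for each GPU
--     for gpu_id in range(gpu_info["num_gpus"]):
--         for _ in range(max_parallel_per_gpu):
--             gpu_queue.append(gpu_id)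
--
--     # Cyclically assign GPUs
--     for i, exp in enumerate(experiments):
--         gpu_id = gpu_queue[i % len(gpu_queue)]
--         experiment_configs.append((exp[0], exp[1], exp[2], exp[3], gpu_id))
--
--     return experiment_configs
-- ===== SOURCE B (Python) =====
-- def assign_gpu_resources(experiments, gpu_info, max_parallel_per_gpu=4):
--     """Assign GPU resources for experiments"""
--     if gpu_info["num_gpus"] == 0:
--         # No GPU available, use CPU
--         return [(exp[0], exp[1], exp[2], exp[3], None) for exp in experiments]
--     configs = []
--     remaining = list(experiments)
--     # Deal experiments out in rounds: each round hands every GPU its next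
--     # batch of max_parallel_per_gpu experiments, until none remain.
--     while remaining:
--         for gpu_id in range(gpu_info["num_gpus"]):
--             batch = remaining[:max_parallel_per_gpu]
--             remaining = remaining[max_parallel_per_gpu:]
--             for exp in batch:
--                 configs.append((exp[0], exp[1], exp[2], exp[3], gpu_id))
--     return configs
-- ===== Notes on version B (the rewrite author's own statement) =====
-- stated objective: alternative
-- what changed: Replaces A's precomputed gpu_queue slot table and per-index modulo lookup with a dealing loop: a while loop repeatedly slices the next max_parallel_per_gpu experiments off the remaining list for each GPU in turn, so no index arithmetic or lookup table is used at all.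
import Mathlib
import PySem

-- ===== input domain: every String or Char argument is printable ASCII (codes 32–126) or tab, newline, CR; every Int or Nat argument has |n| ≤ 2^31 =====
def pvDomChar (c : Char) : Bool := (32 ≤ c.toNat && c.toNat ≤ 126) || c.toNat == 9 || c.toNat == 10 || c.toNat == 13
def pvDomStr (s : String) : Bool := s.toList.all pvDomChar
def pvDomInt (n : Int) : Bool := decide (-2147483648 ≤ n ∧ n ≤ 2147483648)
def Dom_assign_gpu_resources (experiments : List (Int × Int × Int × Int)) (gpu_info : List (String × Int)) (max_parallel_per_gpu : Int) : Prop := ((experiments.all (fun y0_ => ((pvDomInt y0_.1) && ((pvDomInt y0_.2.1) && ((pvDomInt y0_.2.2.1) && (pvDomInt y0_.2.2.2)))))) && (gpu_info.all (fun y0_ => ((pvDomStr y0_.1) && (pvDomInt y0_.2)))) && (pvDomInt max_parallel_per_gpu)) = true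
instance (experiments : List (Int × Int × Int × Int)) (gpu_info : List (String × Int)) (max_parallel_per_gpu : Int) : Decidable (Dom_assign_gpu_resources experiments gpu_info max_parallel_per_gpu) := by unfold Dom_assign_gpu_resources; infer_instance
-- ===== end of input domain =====

-- B replaces A's slot table + modulo lookup with a dealing while-loop that slices
-- batches of max_parallel_per_gpu experiments off the remaining list per GPU (objective: alternative).

-- ===== PORT A =====
def assign_gpu_resources (experiments : List (Int × Int × Int × Int)) (gpu_info : List (String × Int)) (max_parallel_per_gpu : Int) : List (Int × Int × Int × Int × Option Int) :=
  -- gpu_info["num_gpus"]: first-match lookup; KeyError (missing key) is excluded by Pre_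
  let n := (List.lookup "num_gpus" gpu_info).getD 0
  if n = 0 then
    experiments.map (fun e => (e.1, e.2.1, e.2.2.1, e.2.2.2, none))
  else
    -- for gpu_id in range(num_gpus): for _ in range(max_parallel_per_gpu): gpu_queue.append(gpu_id)
    let gpu_queue : List Int :=
      (PySem.List.pyRange 0 n 1).foldl
        (fun q g => (PySem.List.pyRange 0 max_parallel_per_gpu 1).foldl (fun q' _ => q' ++ [g]) q) []
    -- gpu_queue[i % len(gpu_queue)]; ZeroDivisionError (empty queue, nonempty experiments) excluded by Pre_
    (PySem.List.enumerate experiments 0).foldl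
      (fun acc ie =>
        let gid := PySem.List.pyGetD gpu_queue (PySem.Int.mod ie.1 (gpu_queue.length : Int)) 0
        acc ++ [(ie.2.1, ie.2.2.1, ie.2.2.2.1, ie.2.2.2.2, some gid)]) []

-- ===== PORT B =====
-- one round of the while body: for gpu_id in range(num_gpus): batch = remaining[:m]; remaining = remaining[m:]; append batch
def pvRound (g m : Int) (st : List (Int × Int × Int × Int × Option Int) × List (Int × Int × Int × Int)) : List (Int × Int × Int × Int × Option Int) × List (Int × Int × Int × Int) :=
  (PySem.List.pyRange 0 g 1).foldl
    (fun st gid =>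
      let batch := PySem.List.slice st.2 none (some m)
      let rem := PySem.List.slice st.2 (some m) none
      (st.1 ++ batch.map (fun e => (e.1, e.2.1, e.2.2.1, e.2.2.2, some gid)), rem))
    st

-- the while loop; fuel only makes the recursion structural (inside Pre_ each round consumes ≥ 1 experiment)
def pvWhile (fuel : Nat) (g m : Int) (configs : List (Int × Int × Int × Int × Option Int)) (remaining : List (Int × Int × Int × Int)) : List (Int × Int × Int × Int × Option Int) :=
  match fuel with
  | 0 => configs
  | fuel + 1 =>
    if remaining = [] then configs
    else
      let st := pvRound g m (configs, remaining)
      pvWhile fuel g m st.1 st.2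

def assign_gpu_resources_alt (experiments : List (Int × Int × Int × Int)) (gpu_info : List (String × Int)) (max_parallel_per_gpu : Int) : List (Int × Int × Int × Int × Option Int) :=
  let n := (List.lookup "num_gpus" gpu_info).getD 0
  if n = 0 then
    experiments.map (fun e => (e.1, e.2.1, e.2.2.1, e.2.2.2, none))
  else
    pvWhile (experiments.length + 1) n max_parallel_per_gpu [] experiments

-- ===== PRECONDITION & SPEC =====
-- Pre_ excludes exactly the inputs where A raises: a missing "num_gpus" key (KeyError), and a
-- nonempty experiment list with an empty slot table, i.e. num_gpus ≠ 0 with (num_gpus ≤ 0 or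
-- max_parallel_per_gpu ≤ 0) (ZeroDivisionError from i % 0).
def Pre_assign_gpu_resources (experiments : List (Int × Int × Int × Int)) (gpu_info : List (String × Int)) (max_parallel_per_gpu : Int) : Prop :=
  (List.lookup "num_gpus" gpu_info).isSome = true ∧
  ((List.lookup "num_gpus" gpu_info).getD 0 = 0 ∨ experiments = [] ∨
   (0 < (List.lookup "num_gpus" gpu_info).getD 0 ∧ 0 < max_parallel_per_gpu))
instance (experiments : List (Int × Int × Int × Int)) (gpu_info : List (String × Int)) (max_parallel_per_gpu : Int) : Decidable (Pre_assign_gpu_resources experiments gpu_info max_parallel_per_gpu) := by unfold Pre_assign_gpu_resources; infer_instance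

def pvWitness_assign_gpu_resources : (List (Int × Int × Int × Int)) × (List (String × Int)) × Int :=
  ([(1, 2, 3, 4), (5, 6, 7, 8), (9, 9, 9, 9)], [("num_gpus", 2)], 1)

def Spec_assign_gpu_resources (experiments : List (Int × Int × Int × Int)) (gpu_info : List (String × Int)) (max_parallel_per_gpu : Int) (out : List (Int × Int × Int × Int × Option Int)) : Prop := out = assign_gpu_resources_alt experiments gpu_info max_parallel_per_gpu
instance (experiments : List (Int × Int × Int × Int)) (gpu_info : List (String × Int)) (max_parallel_per_gpu : Int) (out : List (Int × Int × Int × Int × Option Int)) : Decidable (Spec_assign_gpu_resources experiments gpu_info max_parallel_per_gpu out) := by unfold Spec_assign_gpu_resources; infer_instance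

-- ===== CLAIM =====
def Claim_equal_assign_gpu_resources : Prop := ∀ (experiments : List (Int × Int × Int × Int)) (gpu_info : List (String × Int)) (max_parallel_per_gpu : Int), Dom_assign_gpu_resources experiments gpu_info max_parallel_per_gpu → Pre_assign_gpu_resources experiments gpu_info max_parallel_per_gpu → Spec_assign_gpu_resources experiments gpu_info max_parallel_per_gpu (assign_gpu_resources experiments gpu_info max_parallel_per_gpu)

-- ===== LEMMAS AND PROOFS =====

-- the canonical result both programs compute: experiment k gets gpu (k % slots) / mt
def pvF (mt slots : Nat) (p : (Int × Int × Int × Int) × Nat) : Int × Int × Int × Int × Option Int :=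
  (p.1.1, p.1.2.1, p.1.2.2.1, p.1.2.2.2, some (((p.2 % slots) / mt : Nat) : Int))

-- ---- A side ----
lemma pv_flat_len (mt : Nat) (t : Nat) :
    ((List.range t).flatMap (fun (j : Nat) => List.replicate mt ((j : Int)))).length = t * mt := by
  simp [List.length_flatMap, Nat.mul_comm]

lemma pv_flat_get (mt : Nat) : ∀ (t k : Nat), k < t * mt →
    ((List.range t).flatMap (fun (j : Nat) => List.replicate mt ((j : Int))))[k]? = some ((k / mt : Nat) : Int) := by
  intro t
  induction t with
  | zero => intro k hk; omega
  | succ t ih =>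
    intro k hk
    rw [List.range_succ, List.flatMap_append]
    by_cases h : k < t * mt
    · rw [List.getElem?_append_left (by rw [pv_flat_len]; exact h)]
      exact ih k h
    · rw [List.getElem?_append_right (by rw [pv_flat_len]; omega)]
      rw [pv_flat_len]
      have hsucc : (t + 1) * mt = t * mt + mt := by ring
      have hdiv : k / mt = t := Nat.div_eq_of_lt_le (by omega) (by rw [Nat.succ_mul]; omega)
      simp [List.getElem?_replicate, hdiv]
      omega

lemma pv_queue_eq (n m : Int) :
    ((PySem.List.pyRange 0 n 1).foldl
      (fun q g => (PySem.List.pyRange 0 m 1).foldl (fun q' _ => q' ++ [g]) q) []) =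
    (List.range n.toNat).flatMap (fun (j : Nat) => List.replicate m.toNat ((j : Int))) := by
  have hinner : ∀ (q : List Int) (g : Int),
      (PySem.List.pyRange 0 m 1).foldl (fun q' _ => q' ++ [g]) q = q ++ List.replicate m.toNat g := by
    intro q g
    rw [PySem.List.foldl_append_singleton_eq_map]
    congr 1
    rw [List.map_const']
    congr 1
    simp [PySem.List.length_pyRange_one]
  rw [PySem.List.foldl_congr_mem (PySem.List.pyRange 0 n 1)
      (fun q g => (PySem.List.pyRange 0 m 1).foldl (fun q' _ => q' ++ [g]) q)
      (fun q g => q ++ List.replicate m.toNat g) []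
      (fun acc x _ => hinner acc x)]
  rw [PySem.List.foldl_append_eq_flatMap, PySem.List.pyRange_one]
  simp [List.flatMap_map]

-- A's nonzero branch computes the canonical map
lemma pv_A_canon (exps : List (Int × Int × Int × Int)) (n m : Int) (hn : 0 < n) (hm : 0 < m) :
    ((PySem.List.enumerate exps 0).foldl
      (fun acc ie =>
        let q := ((PySem.List.pyRange 0 n 1).foldl
          (fun q g => (PySem.List.pyRange 0 m 1).foldl (fun q' _ => q' ++ [g]) q) [])
        acc ++ [(ie.2.1, ie.2.2.1, ie.2.2.2.1, ie.2.2.2.2,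
          some (PySem.List.pyGetD q (PySem.Int.mod ie.1 (q.length : Int)) 0))]) []) =
    exps.zipIdx.map (pvF m.toNat (n.toNat * m.toNat)) := by
  rw [PySem.List.foldl_append_singleton_eq_map]
  rw [List.nil_append, PySem.List.enumerate_eq_zipIdx_map, List.map_map]
  apply List.map_congr_left
  intro p _
  simp only [Function.comp]
  rw [pv_queue_eq n m, pv_flat_len m.toNat n.toNat]
  have hsz : 0 < n.toNat * m.toNat := Nat.mul_pos (by omega) (by omega)
  have hbound : p.2 % (n.toNat * m.toNat) < n.toNat * m.toNat := Nat.mod_lt _ hsz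
  rw [show ((0 : Int) + (p.2 : Nat)) = ((p.2 : Nat) : Int) by omega]
  rw [PySem.Int.mod_natCast, PySem.List.pyGetD_natCast]
  rw [List.getD_eq_getElem?_getD, pv_flat_get m.toNat n.toNat _ hbound]
  rfl

-- ---- B side ----
lemma pv_round_eq (g m : Int) (hm : 0 < m)
    (cfg : List (Int × Int × Int × Int × Option Int)) (rest : List (Int × Int × Int × Int)) :
    pvRound g m (cfg, rest) =
      (cfg ++ (rest.take (g.toNat * m.toNat)).zipIdx.map
        (fun p => (p.1.1, p.1.2.1, p.1.2.2.1, p.1.2.2.2, some ((p.2 / m.toNat : Nat) : Int))),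
       rest.drop (g.toNat * m.toNat)) := by
  unfold pvRound
  rw [PySem.List.pyRange_one, List.foldl_map]
  simp only [Int.sub_zero, Int.zero_add]
  induction g.toNat with
  | zero => simp
  | succ t ih =>
    rw [List.range_succ, List.foldl_append, ih, List.foldl_cons, List.foldl_nil]
    simp only
    rw [PySem.List.slice_to _ hm.le, PySem.List.slice_from _ hm.le, List.drop_drop]
    have hmul : (t + 1) * m.toNat = t * m.toNat + m.toNat := by ring
    by_cases hle : rest.length ≤ t * m.toNat
    · have h1 : rest.drop (t * m.toNat) = [] := List.drop_eq_nil_of_le hle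
      have h2 : rest.take (t * m.toNat) = rest := List.take_of_length_le hle
      have h3 : rest.take ((t + 1) * m.toNat) = rest := List.take_of_length_le (by omega)
      simp [h1, h2, h3]
      omega
    · have hlen : (rest.take (t * m.toNat)).length = t * m.toNat := by
        rw [List.length_take]; omega
      simp only [Prod.mk.injEq]
      refine ⟨?_, by congr 1; omega⟩
      rw [List.append_assoc]
      congr 1
      rw [hmul, List.take_add, List.zipIdx_append, List.map_append]
      congr 1
      rw [hlen, Nat.zero_add]
      set L := (rest.drop (t * m.toNat)).take m.toNat with hL
      have hb : L.length ≤ m.toNat := by rw [hL]; simp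
      have hdiv : ∀ p ∈ L.zipIdx (t * m.toNat), p.2 / m.toNat = t := by
        intro p hp
        obtain ⟨x, i⟩ := p
        have h1 := (List.mem_zipIdx hp).1
        have h2 := List.snd_lt_add_of_mem_zipIdx hp
        simp only at h1 h2 ⊢
        refine Nat.div_eq_of_lt_le h1 ?_
        have hs := Nat.succ_mul t m.toNat
        omega
      calc L.map (fun e => (e.1, e.2.1, e.2.2.1, e.2.2.2, some ((t : Nat) : Int)))
          = ((L.zipIdx (t * m.toNat)).map Prod.fst).map
            (fun e => (e.1, e.2.1, e.2.2.1, e.2.2.2, some ((t : Nat) : Int))) := by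
            rw [List.zipIdx_map_fst]
        _ = (L.zipIdx (t * m.toNat)).map
            (fun p => (p.1.1, p.1.2.1, p.1.2.2.1, p.1.2.2.2, some ((t : Nat) : Int))) := by
            rw [List.map_map]; rfl
        _ = (L.zipIdx (t * m.toNat)).map
            (fun p => (p.1.1, p.1.2.1, p.1.2.2.1, p.1.2.2.2, some ((p.2 / m.toNat : Nat) : Int))) := by
            apply List.map_congr_left; intro p hp; rw [hdiv p hp]

-- index shift by slots does not change pvF
lemma pv_shift (mt slots : Nat) : ∀ (l : List (Int × Int × Int × Int)) (s : Nat),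
    (l.zipIdx (s + slots)).map (pvF mt slots) = (l.zipIdx s).map (pvF mt slots) := by
  intro l
  induction l with
  | nil => intro s; simp
  | cons x xs ih =>
    intro s
    rw [List.zipIdx_cons, List.zipIdx_cons, List.map_cons, List.map_cons]
    congr 1
    · simp [pvF, Nat.add_mod_right]
    · rw [show s + slots + 1 = (s + 1) + slots by ring, ih]

-- the while loop computes the canonical map
lemma pv_while_eq (g m : Int) (hg : 0 < g) (hm : 0 < m) :
    ∀ (fuel : Nat) (rest : List (Int × Int × Int × Int)) (cfg : List (Int × Int × Int × Int × Option Int)),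
    rest.length ≤ fuel →
    pvWhile fuel g m cfg rest = cfg ++ rest.zipIdx.map (pvF m.toNat (g.toNat * m.toNat)) := by
  intro fuel
  induction fuel with
  | zero =>
    intro rest cfg h
    have : rest = [] := List.length_eq_zero_iff.1 (by omega)
    subst this; simp [pvWhile]
  | succ fuel ih =>
    intro rest cfg h
    rw [pvWhile]
    by_cases hnil : rest = []
    · simp [hnil]
    · simp only [hnil, if_false]
      rw [pv_round_eq g m hm]
      have hsz : 0 < g.toNat * m.toNat := Nat.mul_pos (by omega) (by omega)
      have hlen : (rest.drop (g.toNat * m.toNat)).length ≤ fuel := by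
        rw [List.length_drop]
        have : rest.length ≠ 0 := fun hc => hnil (List.length_eq_zero_iff.1 hc)
        omega
      rw [ih _ _ hlen, List.append_assoc]
      congr 1
      conv_rhs => rw [← List.take_append_drop (g.toNat * m.toNat) rest, List.zipIdx_append]
      rw [List.map_append]
      congr 1
      · -- the freshly dealt round: indices < slots so p.2 % slots = p.2
        apply List.map_congr_left
        intro p hp
        have h1 := List.snd_lt_add_of_mem_zipIdx hp
        have h2 : (rest.take (g.toNat * m.toNat)).length ≤ g.toNat * m.toNat := by
          simp [List.length_take]
        have hlt : p.2 < g.toNat * m.toNat := by omega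
        simp [pvF, Nat.mod_eq_of_lt hlt]
      · by_cases hle : rest.length ≤ g.toNat * m.toNat
        · simp [List.drop_eq_nil_of_le hle]
        · have hlen' : (rest.take (g.toNat * m.toNat)).length = g.toNat * m.toNat := by
            rw [List.length_take]; omega
          rw [hlen']
          have h := pv_shift m.toNat (g.toNat * m.toNat) (rest.drop (g.toNat * m.toNat)) 0
          simpa using h.symm

-- ===== VERDICT =====
theorem assign_gpu_resources_spec : Claim_equal_assign_gpu_resources := by
  intro exps gpu_info m _ hpre
  obtain ⟨hkey, hcases⟩ := hpre
  unfold Spec_assign_gpu_resources assign_gpu_resources assign_gpu_resources_alt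
  set n := (List.lookup "num_gpus" gpu_info).getD 0 with hn
  by_cases h0 : n = 0
  · simp [h0]
  · simp only [h0, if_false]
    rcases hcases with h | hempty | ⟨hpos, hmpos⟩
    · exact absurd h h0
    · subst hempty
      simp [PySem.List.enumerate, pvWhile]
    · rw [pv_while_eq n m hpos hmpos (exps.length + 1) exps [] (by omega), List.nil_append]
      exact pv_A_canon exps n m hpos hmpos
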